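-- pv_equiv track=rewrite | github.com/amb5l/tyto2 | src/designs/tmds_cap/software/client/tmds_cap.py | bch_ecc
-- ===== SOURCE A (Python) =====
-- def int2vec(x,n):
--     return [(x >> i) & 1 for i in range(n)]
--
-- def vec2int(v):
--     r = 0
--     for i in range(len(v)):
--         r |= v[i] << i
--     return r
--
-- def xor_vec(v):
--     r = 0
--     for bit in v:
--         r ^= bit
--     return r
--
-- def bch_ecc(bytes):
--     q = int2vec(0,8);
--     n = q[:]
--     for byte in bytes:
--         d = int2vec(byte,8)
--         # see hdmi_bch_ecc.py
--         n[0] = xor_vec([d[0],d[1],d[2],d[4],d[5],d[7],q[0],q[1],q[2],q[4],q[5],q[7]])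
--         n[1] = xor_vec([d[3],d[4],d[6],d[7],q[3],q[4],q[6],q[7]])
--         n[2] = xor_vec([d[1],d[2],q[1],q[2]])
--         n[3] = xor_vec([d[0],d[2],d[3],q[0],q[2],q[3]])
--         n[4] = xor_vec([d[0],d[1],d[3],d[4],q[0],q[1],q[3],q[4]])
--         n[5] = xor_vec([d[1],d[2],d[4],d[5],q[1],q[2],q[4],q[5]])
--         n[6] = xor_vec([d[0],d[2],d[3],d[5],d[6],q[0],q[2],q[3],q[5],q[6]])
--         n[7] = xor_vec([d[0],d[1],d[3],d[4],d[6],d[7],q[0],q[1],q[3],q[4],q[6],q[7]])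
--         q = n[:]
--     return vec2int(q)
-- ===== SOURCE B (Python) =====
-- # Table-driven: precompute the 256-entry step table once; the per-byte update is a
-- # single lookup q = _T[(byte & 255) ^ q], valid because the BCH step is XOR-linear
-- # and uses identical bit formulas for the d and q halves.
--
-- def _ecc(b):
--     d = [(b >> i) & 1 for i in range(8)]
--     n0 = d[0] ^ d[1] ^ d[2] ^ d[4] ^ d[5] ^ d[7]
--     n1 = d[3] ^ d[4] ^ d[6] ^ d[7]
--     n2 = d[1] ^ d[2]
--     n3 = d[0] ^ d[2] ^ d[3]
--     n4 = d[0] ^ d[1] ^ d[3] ^ d[4]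
--     n5 = d[1] ^ d[2] ^ d[4] ^ d[5]
--     n6 = d[0] ^ d[2] ^ d[3] ^ d[5] ^ d[6]
--     n7 = d[0] ^ d[1] ^ d[3] ^ d[4] ^ d[6] ^ d[7]
--     return n0 | n1 << 1 | n2 << 2 | n3 << 3 | n4 << 4 | n5 << 5 | n6 << 6 | n7 << 7
--
-- _T = [_ecc(b) for b in range(256)]
--
-- def bch_ecc(bytes):
--     q = 0
--     for byte in bytes:
--         q = _T[(byte & 255) ^ q]
--     return q
-- ===== Notes on version B (the rewrite author's own statement) =====
-- stated objective: faster
-- what changed: Replaces the per-byte bit-vector decomposition (int2vec/xor_vec/vec2int over 8-element lists) by a 256-entry lookup table built once, exploiting that the BCH step is XOR-linear with identical d/q formulas, so each byte costs a single table lookup q = T[(byte & 255) ^ q].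
import Mathlib
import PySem

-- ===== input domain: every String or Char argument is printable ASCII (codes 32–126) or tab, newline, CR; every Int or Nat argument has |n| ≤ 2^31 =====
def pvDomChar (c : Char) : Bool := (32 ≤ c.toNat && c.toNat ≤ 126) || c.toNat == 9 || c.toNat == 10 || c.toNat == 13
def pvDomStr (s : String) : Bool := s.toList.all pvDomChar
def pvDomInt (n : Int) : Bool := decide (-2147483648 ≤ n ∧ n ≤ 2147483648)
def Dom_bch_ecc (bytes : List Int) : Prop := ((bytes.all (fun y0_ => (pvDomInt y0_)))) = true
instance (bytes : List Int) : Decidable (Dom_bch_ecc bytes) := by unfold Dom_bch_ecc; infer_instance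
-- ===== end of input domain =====

-- B replaces the per-byte bit-vector shuffling by one precomputed 256-entry table
-- lookup per byte (valid because the BCH step is XOR-linear with identical d/q formulas).

-- ===== PORT A =====
-- Python `x >> k` (k ≥ 0) is Lean's `>>>` with a Nat shift amount (PYSEM.md);
-- `&`, `|`, `^` are PySem.Int.band/bor/bxor.
def pyShr (x : Int) (k : Nat) : Int := x >>> k

def int2vec (x n : Int) : List Int :=
  -- i comes from range(n), so i ≥ 0 and `i.toNat` is exact
  (PySem.List.pyRange 0 n 1).map (fun i => PySem.Int.band (pyShr x i.toNat) 1)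

def vec2int (v : List Int) : Int :=
  -- v[i] with i ∈ range(len(v)) never raises, so pyGetD's default is unreachable
  (PySem.List.pyRange 0 (v.length : Int) 1).foldl
    (fun r i => PySem.Int.bor r ((PySem.List.pyGetD v i 0) <<< i.toNat)) 0

def xor_vec (v : List Int) : Int := v.foldl (fun r bit => PySem.Int.bxor r bit) 0

-- the loop body: d/q indices 0–7 on lists of length 8, so pyGetD's default is unreachable
def stepA (st : List Int × List Int) (byte : Int) : List Int × List Int :=
  let q := st.1
  let d := int2vec byte 8
  let gd := fun i => PySem.List.pyGetD d i 0
  let gq := fun i => PySem.List.pyGetD q i 0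
  let n := st.2
  let n := n.set 0 (xor_vec [gd 0, gd 1, gd 2, gd 4, gd 5, gd 7, gq 0, gq 1, gq 2, gq 4, gq 5, gq 7])
  let n := n.set 1 (xor_vec [gd 3, gd 4, gd 6, gd 7, gq 3, gq 4, gq 6, gq 7])
  let n := n.set 2 (xor_vec [gd 1, gd 2, gq 1, gq 2])
  let n := n.set 3 (xor_vec [gd 0, gd 2, gd 3, gq 0, gq 2, gq 3])
  let n := n.set 4 (xor_vec [gd 0, gd 1, gd 3, gd 4, gq 0, gq 1, gq 3, gq 4])
  let n := n.set 5 (xor_vec [gd 1, gd 2, gd 4, gd 5, gq 1, gq 2, gq 4, gq 5])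
  let n := n.set 6 (xor_vec [gd 0, gd 2, gd 3, gd 5, gd 6, gq 0, gq 2, gq 3, gq 5, gq 6])
  let n := n.set 7 (xor_vec [gd 0, gd 1, gd 3, gd 4, gd 6, gd 7, gq 0, gq 1, gq 3, gq 4, gq 6, gq 7])
  (n, n)

def bch_ecc (bytes : List Int) : Int :=
  let q := int2vec 0 8
  let n := q
  vec2int (bytes.foldl stepA (q, n)).1

-- ===== PORT B =====
-- Source B's _ecc only ever receives b ∈ range(256), so Nat arithmetic is exact here
def pvEcc (b : Nat) : Nat :=
  let d := (List.range 8).map (fun i => (b >>> i) &&& 1)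
  let g := fun i => d.getD i 0
  let n0 := g 0 ^^^ g 1 ^^^ g 2 ^^^ g 4 ^^^ g 5 ^^^ g 7
  let n1 := g 3 ^^^ g 4 ^^^ g 6 ^^^ g 7
  let n2 := g 1 ^^^ g 2
  let n3 := g 0 ^^^ g 2 ^^^ g 3
  let n4 := g 0 ^^^ g 1 ^^^ g 3 ^^^ g 4
  let n5 := g 1 ^^^ g 2 ^^^ g 4 ^^^ g 5
  let n6 := g 0 ^^^ g 2 ^^^ g 3 ^^^ g 5 ^^^ g 6
  let n7 := g 0 ^^^ g 1 ^^^ g 3 ^^^ g 4 ^^^ g 6 ^^^ g 7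
  n0 ||| n1 <<< 1 ||| n2 <<< 2 ||| n3 <<< 3 ||| n4 <<< 4 ||| n5 <<< 5 ||| n6 <<< 6 ||| n7 <<< 7

def pvT : List Int := (List.range 256).map (fun b => (pvEcc b : Int))

-- `_T[(byte & 255) ^ q]`: the index is provably in [0, 256), so the list index never
-- raises (getD's default unreachable) and `.toNat` of the nonnegative index is exact
def bch_ecc_alt (bytes : List Int) : Int :=
  bytes.foldl (fun q byte => pvT.getD (PySem.Int.bxor (PySem.Int.band byte 255) q).toNat 0) 0

-- ===== PRECONDITION & SPEC =====
def Spec_bch_ecc (bytes : List Int) (out : Int) : Prop := out = bch_ecc_alt bytes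
instance (bytes : List Int) (out : Int) : Decidable (Spec_bch_ecc bytes out) := by unfold Spec_bch_ecc; infer_instance

-- ===== CLAIM (what is proved, stated in full; the proofs are below) =====
def Claim_equal_bch_ecc : Prop := ∀ (bytes : List Int), Dom_bch_ecc bytes → Spec_bch_ecc bytes (bch_ecc bytes)

-- ===== LEMMAS AND PROOFS =====

-- `byte & 255` is `byte mod 256`
theorem band255 (b : Int) : PySem.Int.band b 255 = b % 256 := by
  have hmask : ∀ m : Nat, m &&& 255 = m % 256 := fun m => by
    have := Nat.and_two_pow_sub_one_eq_mod m 8; norm_num at this; exact this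
  unfold PySem.Int.band
  split_ifs with h1 h2 h2 <;> [skip; omega; skip; omega]
  · rw [show (255:Int).toNat = 255 from rfl, hmask]; omega
  · rw [show (255:Int).toNat = 255 from rfl, Nat.and_comm, hmask]; omega

-- a low bit of `b` only depends on `b mod 256`
theorem bit_emod (b : Int) (i : Nat) :
    PySem.Int.band (pyShr b i) 1 = PySem.Int.band (pyShr (b % 256) i) 1 ∨ 8 ≤ i := by
  by_cases hi : i < 8
  · left
    rw [pyShr, pyShr, PySem.Int.band_one, PySem.Int.band_one,
        PySem.Int.mod_eq_emod_of_pos (b := 2) (by norm_num),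
        PySem.Int.mod_eq_emod_of_pos (b := 2) (by norm_num),
        Int.shiftRight_eq_div_pow, Int.shiftRight_eq_div_pow]
    interval_cases i <;> norm_num <;> omega
  · right; omega

theorem int2vec_emod (b : Int) : int2vec b 8 = int2vec (b % 256) 8 := by
  have h : PySem.List.pyRange 0 8 1 = [0,1,2,3,4,5,6,7] := by decide
  rw [int2vec, int2vec, h]
  apply List.map_congr_left
  intro i hi
  simp only [List.mem_cons, List.not_mem_nil, or_false] at hi
  rcases hi with rfl|rfl|rfl|rfl|rfl|rfl|rfl|rfl <;>
    first
      | exact (bit_emod b (Int.toNat 0)).resolve_right (by decide)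
      | exact (bit_emod b (Int.toNat 1)).resolve_right (by decide)
      | exact (bit_emod b (Int.toNat 2)).resolve_right (by decide)
      | exact (bit_emod b (Int.toNat 3)).resolve_right (by decide)
      | exact (bit_emod b (Int.toNat 4)).resolve_right (by decide)
      | exact (bit_emod b (Int.toNat 5)).resolve_right (by decide)
      | exact (bit_emod b (Int.toNat 6)).resolve_right (by decide)
      | exact (bit_emod b (Int.toNat 7)).resolve_right (by decide)

-- the eight values stepA writes, as a function of the d and q bit-vectors
def outList (d q : List Int) : List Int :=
  let gd := fun i => PySem.List.pyGetD d i 0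
  let gq := fun i => PySem.List.pyGetD q i 0
  [xor_vec [gd 0, gd 1, gd 2, gd 4, gd 5, gd 7, gq 0, gq 1, gq 2, gq 4, gq 5, gq 7],
   xor_vec [gd 3, gd 4, gd 6, gd 7, gq 3, gq 4, gq 6, gq 7],
   xor_vec [gd 1, gd 2, gq 1, gq 2],
   xor_vec [gd 0, gd 2, gd 3, gq 0, gq 2, gq 3],
   xor_vec [gd 0, gd 1, gd 3, gd 4, gq 0, gq 1, gq 3, gq 4],
   xor_vec [gd 1, gd 2, gd 4, gd 5, gq 1, gq 2, gq 4, gq 5],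
   xor_vec [gd 0, gd 2, gd 3, gd 5, gd 6, gq 0, gq 2, gq 3, gq 5, gq 6],
   xor_vec [gd 0, gd 1, gd 3, gd 4, gd 6, gd 7, gq 0, gq 1, gq 3, gq 4, gq 6, gq 7]]

theorem stepA_eq (byte : Int) (q nn : List Int) (h : nn.length = 8) :
    stepA (q, nn) byte = (outList (int2vec byte 8) q, outList (int2vec byte 8) q) := by
  match nn, h with
  | [a0,a1,a2,a3,a4,a5,a6,a7], _ => rfl

-- the low 8 bits of a Nat
def bits8 (x : Nat) : List Nat :=
  [x >>> 0 &&& 1, x >>> 1 &&& 1, x >>> 2 &&& 1, x >>> 3 &&& 1,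
   x >>> 4 &&& 1, x >>> 5 &&& 1, x >>> 6 &&& 1, x >>> 7 &&& 1]

def mapCast : List Nat → List Int
  | [] => []
  | a :: t => (a : Int) :: mapCast t

-- Nat-level mirror of outList on two 8-bit vectors
def outN : List Nat → List Nat → List Nat
  | [a0,a1,a2,a3,a4,a5,a6,a7], [b0,b1,b2,b3,b4,b5,b6,b7] =>
    [a0 ^^^ a1 ^^^ a2 ^^^ a4 ^^^ a5 ^^^ a7 ^^^ (b0 ^^^ b1 ^^^ b2 ^^^ b4 ^^^ b5 ^^^ b7),
     a3 ^^^ a4 ^^^ a6 ^^^ a7 ^^^ (b3 ^^^ b4 ^^^ b6 ^^^ b7),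
     a1 ^^^ a2 ^^^ (b1 ^^^ b2),
     a0 ^^^ a2 ^^^ a3 ^^^ (b0 ^^^ b2 ^^^ b3),
     a0 ^^^ a1 ^^^ a3 ^^^ a4 ^^^ (b0 ^^^ b1 ^^^ b3 ^^^ b4),
     a1 ^^^ a2 ^^^ a4 ^^^ a5 ^^^ (b1 ^^^ b2 ^^^ b4 ^^^ b5),
     a0 ^^^ a2 ^^^ a3 ^^^ a5 ^^^ a6 ^^^ (b0 ^^^ b2 ^^^ b3 ^^^ b5 ^^^ b6),
     a0 ^^^ a1 ^^^ a3 ^^^ a4 ^^^ a6 ^^^ a7 ^^^ (b0 ^^^ b1 ^^^ b3 ^^^ b4 ^^^ b6 ^^^ b7)]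
  | _, _ => []

theorem bit_cast (x k : Nat) : PySem.Int.band ((x:Int) >>> k) 1 = ((x >>> k &&& 1 : Nat) : Int) := by
  rw [PySem.Int.band_one, PySem.Int.mod_eq_emod_of_pos (b := 2) (by norm_num),
      Int.shiftRight_eq_div_pow, Nat.shiftRight_eq_div_pow, Nat.and_one_is_mod,
      Int.natCast_mod, Int.natCast_ediv]
  push_cast
  rfl

theorem int2vec_cast (x : Nat) : int2vec (x : Int) 8 = mapCast (bits8 x) := by
  have h : PySem.List.pyRange 0 8 1 = [0,1,2,3,4,5,6,7] := by decide
  simp only [int2vec, h, List.map, bits8, mapCast, pyShr,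
    show (0:Int).toNat = 0 from rfl, show (1:Int).toNat = 1 from rfl,
    show (2:Int).toNat = 2 from rfl, show (3:Int).toNat = 3 from rfl,
    show (4:Int).toNat = 4 from rfl, show (5:Int).toNat = 5 from rfl,
    show (6:Int).toNat = 6 from rfl, show (7:Int).toNat = 7 from rfl,
    bit_cast]

theorem bxor_zero_left (v : Int) : PySem.Int.bxor 0 v = v := by
  rw [PySem.Int.bxor_comm]; exact PySem.Int.bxor_zero v

theorem outList_cast (x y : Nat) :
    outList (mapCast (bits8 x)) (mapCast (bits8 y)) = mapCast (outN (bits8 x) (bits8 y)) := by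
  simp only [outList, outN, bits8, mapCast, xor_vec, List.foldl,
    PySem.List.pyGetD_ofNat', List.getD_cons_zero, List.getD_cons_succ,
    bxor_zero_left, PySem.Int.bxor_natCast, List.cons.injEq, and_true, Nat.cast_inj]
  and_intros <;> ac_rfl

set_option maxRecDepth 8192 in
theorem pvEcc_step : ∀ x : Fin 256, bits8 (pvEcc x.val) = outN (bits8 x.val) (bits8 0) := by decide

theorem outN_linear (x y : Nat) :
    outN (bits8 x) (bits8 y)
      = List.zipWith (· ^^^ ·) (outN (bits8 x) (bits8 0)) (outN (bits8 y) (bits8 0)) := by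
  simp only [outN, bits8, List.zipWith, Nat.zero_shiftRight, Nat.zero_and, Nat.xor_zero]

theorem outN_xor (x y : Nat) :
    outN (bits8 (x ^^^ y)) (bits8 0)
      = List.zipWith (· ^^^ ·) (outN (bits8 x) (bits8 0)) (outN (bits8 y) (bits8 0)) := by
  simp only [outN, bits8, List.zipWith, Nat.shiftRight_xor_distrib, Nat.and_xor_distrib_right,
    Nat.zero_shiftRight, Nat.zero_and, Nat.xor_zero, List.cons.injEq, and_true]
  and_intros <;> ac_rfl

set_option maxRecDepth 8192 in
theorem pvEcc_lt : ∀ x : Fin 256, pvEcc x.val < 256 := by decide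

theorem step_main (d q : Nat) (hd : d < 256) (hq : q < 256) :
    outList (int2vec (d : Int) 8) (int2vec (q : Int) 8)
      = int2vec ((pvEcc (d ^^^ q) : Nat) : Int) 8 := by
  rw [int2vec_cast d, int2vec_cast q, int2vec_cast (pvEcc (d ^^^ q)), outList_cast]
  apply congrArg
  rw [pvEcc_step ⟨d ^^^ q, Nat.xor_lt_two_pow (n := 8) hd hq⟩, outN_xor, ← outN_linear]

set_option maxRecDepth 8192 in
theorem vec2int_int2vec : ∀ q : Fin 256, vec2int (int2vec (q.val : Int) 8) = (q.val : Int) := by decide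

theorem pvT_getD (i : Nat) (h : i < 256) : pvT.getD i 0 = (pvEcc i : Int) := by
  simp [pvT, List.getD, h]

theorem stepB_eq (byte : Int) (qn : Nat) (h : qn < 256) :
    pvT.getD (PySem.Int.bxor (PySem.Int.band byte 255) (qn : Int)).toNat 0
      = (pvEcc ((byte % 256).toNat ^^^ qn) : Nat) := by
  rw [band255]
  have hb : byte % 256 = (((byte % 256).toNat : Nat) : Int) := by omega
  rw [hb, PySem.Int.bxor_natCast, Int.toNat_natCast]
  exact pvT_getD _ (Nat.xor_lt_two_pow (n := 8) (by omega) h)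

theorem main_inv : ∀ (bytes : List Int) (qn : Nat), qn < 256 → ∀ nn : List Int, nn.length = 8 →
    (bytes.foldl stepA (int2vec (qn : Int) 8, nn)).1
        = int2vec ((bytes.foldl
            (fun q byte => pvT.getD (PySem.Int.bxor (PySem.Int.band byte 255) q).toNat 0)
            (qn : Int)).toNat : Int) 8
      ∧ (bytes.foldl
            (fun q byte => pvT.getD (PySem.Int.bxor (PySem.Int.band byte 255) q).toNat 0)
            (qn : Int)).toNat < 256
      ∧ 0 ≤ (bytes.foldl
            (fun q byte => pvT.getD (PySem.Int.bxor (PySem.Int.band byte 255) q).toNat 0)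
            (qn : Int)) := by
  intro bytes
  induction bytes with
  | nil => intro qn h nn _; simpa using h
  | cons b bs ih =>
    intro qn h nn hn
    have hstep := stepA_eq b (int2vec (qn : Int) 8) nn hn
    have hb' : (b % 256).toNat < 256 := by omega
    have hout : outList (int2vec b 8) (int2vec (qn : Int) 8)
        = int2vec ((pvEcc ((b % 256).toNat ^^^ qn) : Nat) : Int) 8 := by
      rw [int2vec_emod b, show (b % 256) = (((b % 256).toNat : Nat) : Int) by omega]
      exact step_main _ _ hb' h
    have hB := stepB_eq b qn h
    have hlt : pvEcc ((b % 256).toNat ^^^ qn) < 256 :=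
      pvEcc_lt ⟨(b % 256).toNat ^^^ qn, Nat.xor_lt_two_pow (n := 8) hb' h⟩
    simp only [List.foldl_cons, hstep, hout, hB]
    have := ih (pvEcc ((b % 256).toNat ^^^ qn)) hlt
      (int2vec ((pvEcc ((b % 256).toNat ^^^ qn) : Nat) : Int) 8) (by simp [int2vec])
    simpa using this

-- ===== VERDICT (by name: the statement is the Claim_ definition above) =====
theorem bch_ecc_spec : Claim_equal_bch_ecc := by
  intro bytes _
  unfold Spec_bch_ecc bch_ecc bch_ecc_alt
  have h := main_inv bytes 0 (by norm_num) (int2vec 0 8) (by decide)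
  simp only [Nat.cast_zero] at h
  show vec2int (List.foldl stepA (int2vec 0 8, int2vec 0 8) bytes).1 = _
  rw [h.1, vec2int_int2vec ⟨_, h.2.1⟩]
  have h3 := h.2.2
  show ((List.foldl (fun q byte => pvT.getD (PySem.Int.bxor (PySem.Int.band byte 255) q).toNat 0) 0 bytes).toNat : Int) = _
  omega
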